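-- pv_equiv track=rewrite | github.com/raffaelecheula/wulffparticles | wulffparticles/sites_names.py | reduce_sites_distribution
-- ===== SOURCE A (Python) =====
-- def reduce_sites_distribution(
--     sites_distrib: dict,
--     n_hkl_sites: int = 1,
-- ) -> dict:
--     """Reduce the sites distribution to only tuples with length n_hkl_sites."""
--     from itertools import combinations
--     sites_distrib_red = {}
--     for hkl_tuple in sites_distrib:
--         if len(hkl_tuple) == n_hkl_sites:
--             sites_distrib_red[hkl_tuple] = (
--                 sites_distrib_red.get(hkl_tuple, 0) + sites_distrib[hkl_tuple]
--             )
--         elif len(hkl_tuple) > n_hkl_sites: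
--             for hkl_red in combinations(hkl_tuple, n_hkl_sites):
--                 sites_distrib_red[hkl_red] = (
--                     sites_distrib_red.get(hkl_red, 0) + sites_distrib[hkl_tuple]
--                 )
--     return dict(sorted(sites_distrib_red.items()))
-- ===== SOURCE B (Python) =====
-- def reduce_sites_distribution(
--     sites_distrib: dict,
--     n_hkl_sites: int = 1,
-- ) -> dict:
--     """Reduce the sites distribution to only tuples with length n_hkl_sites."""
--     from itertools import combinations
--     # Stage 1: emit every contribution as a flat (combination, value) pair.
--     contribs = []
--     for hkl_tuple, value in sites_distrib.items():
--         if len(hkl_tuple) >= n_hkl_sites: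
--             for combo in combinations(hkl_tuple, n_hkl_sites):
--                 contribs.append((combo, value))
--     # Stage 2: sort the contributions, then collapse each run of equal keys
--     # into one (key, run total) item with a linear index scan (no dict needed).
--     contribs.sort()
--     items = []
--     i = 0
--     while i < len(contribs):
--         combo, total = contribs[i]
--         j = i + 1
--         while j < len(contribs) and contribs[j][0] == combo:
--             total += contribs[j][1]
--             j += 1
--         items.append((combo, total))
--         i = j
--     return dict(items)
-- ===== Notes on version B (the rewrite author's own statement) =====
-- stated objective: alternative
-- what changed: A accumulates running sums in a dict via a three-way branch on len(key) vs n and sorts the dict items at the end; B uses no dict at all: it emits every (combination, value) contribution into a flat list, sorts that list once, and collapses adjacent runs of equal keys with one index-based linear scan.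
import Mathlib
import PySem

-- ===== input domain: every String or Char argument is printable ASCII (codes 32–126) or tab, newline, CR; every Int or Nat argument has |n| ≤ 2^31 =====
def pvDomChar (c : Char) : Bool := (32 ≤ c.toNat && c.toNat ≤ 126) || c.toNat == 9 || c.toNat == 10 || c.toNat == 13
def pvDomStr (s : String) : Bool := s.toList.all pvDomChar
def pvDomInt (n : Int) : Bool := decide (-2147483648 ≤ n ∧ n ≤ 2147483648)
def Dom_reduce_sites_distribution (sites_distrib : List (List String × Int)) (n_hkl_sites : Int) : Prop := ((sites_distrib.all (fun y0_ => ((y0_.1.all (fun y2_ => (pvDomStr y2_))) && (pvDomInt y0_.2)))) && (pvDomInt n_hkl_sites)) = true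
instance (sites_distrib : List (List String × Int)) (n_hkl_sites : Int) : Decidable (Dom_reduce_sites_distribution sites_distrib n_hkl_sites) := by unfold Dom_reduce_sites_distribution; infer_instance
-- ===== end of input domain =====

-- B replaces A's three-way-branched hash accumulation (dict of running sums, sorted at the end)
-- by generate → sort → one linear scan collapsing adjacent runs of equal keys, with no dict at all
-- (objective: alternative). Equivalence is about the RETURN value; neither program mutates its arguments.

-- ===== PORT A =====
-- sorted(d.items()) compares (tuple, int) pairs lexicographically: PySem.List.sorted2 on fst then snd.
def reduce_sites_distribution (sites_distrib : List (List String × Int)) (n_hkl_sites : Int) : List (List String × Int) :=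
  let red : PySem.Dict (List String) Int :=
    sites_distrib.foldl (fun acc p =>
      if (p.1.length : Int) = n_hkl_sites then
        acc.modify p.1 0 (· + p.2)
      else if n_hkl_sites < (p.1.length : Int) then
        (PySem.List.combinations p.1 n_hkl_sites.toNat).foldl
          (fun a c => a.modify c 0 (· + p.2)) acc
      else acc) PySem.Dict.empty
  PySem.List.sorted2 red.items (fun x => x.1) (fun x => x.2) false

-- ===== PORT B =====
-- Source B's inner while loop: sum the leading run of key c, return (total, remainder).
def pvTakeRun (c : List String) (acc : Int) : List (List String × Int) → Int × List (List String × Int)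
  | [] => (acc, [])
  | q :: t => if q.1 = c then pvTakeRun c (acc + q.2) t else (acc, q :: t)

lemma pvTakeRun_snd_length (c : List String) (acc : Int) (t : List (List String × Int)) :
    (pvTakeRun c acc t).2.length ≤ t.length := by
  induction t generalizing acc with
  | nil => simp [pvTakeRun]
  | cons q t ih =>
    simp only [pvTakeRun]
    split
    · exact le_trans (ih _) (Nat.le_succ _)
    · simp

-- Source B's outer while loop: emit one (key, run total) pair per run of the sorted contributions.
def pvCollapse : List (List String × Int) → List (List String × Int)
  | [] => []
  | (c, v) :: t => (c, (pvTakeRun c v t).1) :: pvCollapse (pvTakeRun c v t).2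
termination_by l => l.length
decreasing_by exact Nat.lt_succ_of_le (pvTakeRun_snd_length c v t)

-- dict(items) over the collapsed runs (their keys are distinct) is the items list itself.
def reduce_sites_distribution_alt (sites_distrib : List (List String × Int)) (n_hkl_sites : Int) : List (List String × Int) :=
  let contribs : List (List String × Int) :=
    sites_distrib.foldl (fun acc p =>
      if n_hkl_sites ≤ (p.1.length : Int) then
        (PySem.List.combinations p.1 n_hkl_sites.toNat).foldl (fun a c => a ++ [(c, p.2)]) acc
      else acc) []
  pvCollapse (PySem.List.sorted2 contribs (fun x => x.1) (fun x => x.2) false)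

-- ===== PRECONDITION & SPEC =====
-- A raises ValueError (combinations with negative r) whenever n_hkl_sites < 0 and the dict is
-- nonempty; B calls combinations there too and raises as well. Pre_ excludes exactly those inputs.
def Pre_reduce_sites_distribution (sites_distrib : List (List String × Int)) (n_hkl_sites : Int) : Prop :=
  sites_distrib = [] ∨ 0 ≤ n_hkl_sites
instance (sites_distrib : List (List String × Int)) (n_hkl_sites : Int) : Decidable (Pre_reduce_sites_distribution sites_distrib n_hkl_sites) := by unfold Pre_reduce_sites_distribution; infer_instance

def pvWitness_reduce_sites_distribution : (List (List String × Int)) × Int :=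
  ([(["100", "111"], 3), (["111"], 2)], 1)

def Spec_reduce_sites_distribution (sites_distrib : List (List String × Int)) (n_hkl_sites : Int) (out : List (List String × Int)) : Prop := out = reduce_sites_distribution_alt sites_distrib n_hkl_sites
instance (sites_distrib : List (List String × Int)) (n_hkl_sites : Int) (out : List (List String × Int)) : Decidable (Spec_reduce_sites_distribution sites_distrib n_hkl_sites out) := by unfold Spec_reduce_sites_distribution; infer_instance

-- ===== CLAIM (what is proved, stated in full; the proofs are below) =====
def Claim_equal_reduce_sites_distribution : Prop := ∀ (sites_distrib : List (List String × Int)) (n_hkl_sites : Int), Dom_reduce_sites_distribution sites_distrib n_hkl_sites → Pre_reduce_sites_distribution sites_distrib n_hkl_sites → Spec_reduce_sites_distribution sites_distrib n_hkl_sites (reduce_sites_distribution sites_distrib n_hkl_sites)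

-- ===== LEMMAS AND PROOFS =====

-- The flat contribution list both programs (implicitly) generate, and the total of a key in it.
def pvContrib (sites_distrib : List (List String × Int)) (n_hkl_sites : Int) : List (List String × Int) :=
  sites_distrib.flatMap (fun p => (PySem.List.combinations p.1 n_hkl_sites.toNat).map (fun c => (c, p.2)))

def pvG (L : List (List String × Int)) (k : List String) : Int :=
  ((L.filter (fun p => p.1 == k)).map (fun p => p.2)).sum

-- folding over a flatMap is the nested fold
lemma foldl_flatMap_eq {α β γ : Type} (f : α → List β) (g : γ → β → γ) (xs : List α) (init : γ) :
    (xs.flatMap f).foldl g init = xs.foldl (fun a x => (f x).foldl g a) init := by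
  induction xs generalizing init with
  | nil => rfl
  | cons x t ih => simp [List.flatMap_cons, List.foldl_append, ih]

-- one entry of A's loop = a guarded fold over the combinations of its key (for 0 ≤ n)
lemma step_eq (n : Int) (hn : 0 ≤ n) (acc : PySem.Dict (List String) Int) (p : List String × Int) :
    (if (p.1.length : Int) = n then acc.modify p.1 0 (· + p.2)
     else if n < (p.1.length : Int) then
       (PySem.List.combinations p.1 n.toNat).foldl (fun a c => a.modify c 0 (· + p.2)) acc
     else acc)
    = (if n ≤ (p.1.length : Int) then
        ((PySem.List.combinations p.1 n.toNat).map (fun c => (c, p.2))).foldl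
          (fun a q => a.modify q.1 0 (· + q.2)) acc
       else acc) := by
  rw [List.foldl_map]
  by_cases h1 : (p.1.length : Int) = n
  · have hle : n ≤ (p.1.length : Int) := le_of_eq h1.symm
    have : n.toNat = p.1.length := by omega
    simp [h1, this, PySem.List.combinations_length_self]
  · by_cases h2 : n < (p.1.length : Int)
    · simp [h1, h2, le_of_lt h2]
    · have : ¬ n ≤ (p.1.length : Int) := by omega
      simp [h1, h2, this]

lemma flatMap_filter_of_nil {α β : Type} (p : α → Prop) [DecidablePred p] (F : α → List β)
    (l : List α) (h : ∀ x, ¬ p x → F x = []) :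
    (l.filter (fun x => decide (p x))).flatMap F = l.flatMap F := by
  induction l with
  | nil => rfl
  | cons x t ih =>
    by_cases hx : p x
    · simp [hx, ih]
    · simp [hx, ih, h x hx]

-- A's result, written over the flat contribution list
lemma A_eq_flat (sd : List (List String × Int)) (n : Int) (hn : 0 ≤ n) :
    reduce_sites_distribution sd n
    = PySem.List.sorted2
        ((pvContrib sd n).foldl (fun a q => a.modify q.1 0 (· + q.2)) PySem.Dict.empty).items
        (fun x => x.1) (fun x => x.2) false := by
  unfold reduce_sites_distribution pvContrib
  simp only [step_eq n hn]
  rw [PySem.List.foldl_ite_eq_foldl_filter, ← foldl_flatMap_eq]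
  have hfil : (sd.filter (fun x => decide (n ≤ (x.1.length : Int)))).flatMap
      (fun p => (PySem.List.combinations p.1 n.toNat).map (fun c => (c, p.2)))
      = sd.flatMap (fun p => (PySem.List.combinations p.1 n.toNat).map (fun c => (c, p.2))) := by
    apply flatMap_filter_of_nil
    intro x hx
    have hlt : x.1.length < n.toNat := by omega
    simp [PySem.List.combinations_eq_nil_of_length_lt _ hlt]
  rw [hfil]

-- B's result, written over the flat contribution list
lemma B_eq_flat (sd : List (List String × Int)) (n : Int) (hn : 0 ≤ n) :
    reduce_sites_distribution_alt sd n
    = pvCollapse (PySem.List.sorted2 (pvContrib sd n) (fun x => x.1) (fun x => x.2) false) := by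
  unfold reduce_sites_distribution_alt pvContrib
  simp only [PySem.List.foldl_append_singleton_eq_map]
  rw [PySem.List.foldl_ite_eq_foldl_filter (fun p : List String × Int => n ≤ (p.1.length : Int))
      (fun acc p => acc ++ (PySem.List.combinations p.1 n.toNat).map (fun c => (c, p.2)))]
  rw [PySem.List.foldl_append_eq_flatMap]
  have hfil : ((sd.filter (fun x => decide (n ≤ (x.1.length : Int)))).flatMap
      (fun p => (PySem.List.combinations p.1 n.toNat).map (fun c => (c, p.2))))
      = sd.flatMap (fun p => (PySem.List.combinations p.1 n.toNat).map (fun c => (c, p.2))) := by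
    apply flatMap_filter_of_nil
    intro x hx
    have hlt : x.1.length < n.toNat := by omega
    simp [PySem.List.combinations_eq_nil_of_length_lt _ hlt]
  rw [List.nil_append, hfil]

-- insertBy with a before-test compatible with key preserves key-sortedness
lemma insertBy_pairwise_key {α κ : Type} [LinearOrder κ] (key : α → κ) (before : α → α → Bool)
    (hT : ∀ a b, before a b = true → key a ≤ key b)
    (hF : ∀ a b, before a b = false → key b ≤ key a)
    (x : α) (ys : List α) (h : ys.Pairwise (fun a b => key a ≤ key b)) :
    (PySem.List.insertBy before x ys).Pairwise (fun a b => key a ≤ key b) := by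
  induction ys with
  | nil => simp [PySem.List.insertBy]
  | cons y t ih =>
    rw [List.pairwise_cons] at h
    by_cases hb : before x y = true
    · have hxy := hT _ _ hb
      simp only [PySem.List.insertBy, hb, if_true]
      refine List.Pairwise.cons ?_ (List.Pairwise.cons h.1 h.2)
      intro z hz
      rcases List.mem_cons.mp hz with rfl | hz
      · exact hxy
      · exact le_trans hxy (h.1 z hz)
    · have hyx := hF _ _ (Bool.not_eq_true _ ▸ hb)
      simp only [PySem.List.insertBy, hb]
      refine List.Pairwise.cons ?_ (ih h.2)
      intro z hz
      rcases (PySem.List.insertBy_mem_iff before x z t).mp hz with rfl | hz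
      · exact hyx
      · exact h.1 z hz

-- the before-test sorted2 uses (key = fst, tie-break snd) is compatible with fst
lemma sorted2_pairwise_fst_le (xs : List (List String × Int)) :
    (PySem.List.sorted2 xs (fun x => x.1) (fun x => x.2) false).Pairwise
      (fun a b => a.1 ≤ b.1) := by
  unfold PySem.List.sorted2
  simp only [if_neg (by simp : ¬ (false = true))]
  have main : ∀ (l acc : List (List String × Int)),
      acc.Pairwise (fun a b => a.1 ≤ b.1) →
      (l.foldl (fun acc x =>
        PySem.List.insertBy
          (fun a b => decide (a.1 < b.1) || (!decide (b.1 < a.1) && decide (a.2 < b.2))) x acc) acc).Pairwise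
        (fun a b => a.1 ≤ b.1) := by
    intro l
    induction l with
    | nil => intro acc h; exact h
    | cons x t ih =>
      intro acc h
      refine ih _ (insertBy_pairwise_key (fun p => p.1) _ ?_ ?_ x acc h)
      · intro a b hab
        simp only [Bool.or_eq_true, Bool.and_eq_true, Bool.not_eq_true', decide_eq_true_eq,
          decide_eq_false_iff_not] at hab
        rcases hab with hab | ⟨hab, _⟩
        · exact le_of_lt hab
        · exact le_of_not_gt hab
      · intro a b hab
        simp only [Bool.or_eq_false_iff, Bool.and_eq_false_iff, Bool.not_eq_false',
          decide_eq_true_eq, decide_eq_false_iff_not] at hab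
        exact le_of_not_gt hab.1
  exact main xs [] List.Pairwise.nil

lemma pvTakeRun_eq (c : List String) (acc : Int) (t : List (List String × Int)) :
    pvTakeRun c acc t
    = (acc + ((t.takeWhile (fun q => q.1 == c)).map (fun q => q.2)).sum,
       t.dropWhile (fun q => q.1 == c)) := by
  induction t generalizing acc with
  | nil => simp [pvTakeRun]
  | cons q t ih =>
    by_cases hq : q.1 = c
    · simp only [pvTakeRun, List.takeWhile_cons, List.dropWhile_cons, hq,
        beq_self_eq_true, if_true, List.map_cons, List.sum_cons, ih]
      ring_nf
    · have : (q.1 == c) = false := beq_eq_false_iff_ne.mpr hq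
      simp [pvTakeRun, if_neg hq, this]

-- run-collapse of a key-sorted list: keys strictly increase, each total is the key's total,
-- and the key set is unchanged
lemma pvCollapse_props (S : List (List String × Int)) :
    S.Pairwise (fun a b => a.1 ≤ b.1) →
    (pvCollapse S).Pairwise (fun a b => a.1 < b.1) ∧
    (∀ p ∈ pvCollapse S, p.2 = pvG S p.1) ∧
    (∀ k, k ∈ (pvCollapse S).map (fun p => p.1) ↔ k ∈ S.map (fun p => p.1)) := by
  induction S using pvCollapse.induct with
  | case1 => intro _; simp [pvCollapse, pvG]
  | case2 c v t ih =>
    intro h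
    rw [List.pairwise_cons] at h
    have htr := pvTakeRun_eq c v t
    have hsplit := List.takeWhile_append_dropWhile (p := fun q : List String × Int => q.1 == c) (l := t)
    have f1 : ∀ q ∈ t.takeWhile (fun q => q.1 == c), q.1 = c := by
      intro q hq
      exact eq_of_beq (List.mem_takeWhile_imp (p := fun q : List String × Int => q.1 == c) hq)
    have hrestsub : (t.dropWhile (fun q => q.1 == c)).Sublist t := List.dropWhile_sublist _
    have hrestpw : (t.dropWhile (fun q => q.1 == c)).Pairwise (fun a b => a.1 ≤ b.1) :=
      h.2.sublist hrestsub
    have f2 : ∀ q ∈ t.dropWhile (fun q => q.1 == c), c < q.1 := by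
      cases hre : t.dropWhile (fun q => q.1 == c) with
      | nil => simp
      | cons r0 rr =>
        have hne : (t.dropWhile (fun q => q.1 == c)) ≠ [] := by simp [hre]
        have hr0P := List.head_dropWhile_not (fun q : List String × Int => q.1 == c) hne
        simp only [hre, List.head_cons, beq_eq_false_iff_ne, ne_eq] at hr0P
        have hr0t : r0 ∈ t := hrestsub.subset (by simp [hre])
        have hc0 : c < r0.1 := lt_of_le_of_ne (h.1 r0 hr0t) (Ne.symm hr0P)
        intro q hq
        rw [hre] at hrestpw
        rcases List.mem_cons.mp hq with rfl | hq
        · exact hc0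
        · exact lt_of_lt_of_le hc0 ((List.pairwise_cons.mp hrestpw).1 q hq)
    -- filter of the full list at key c and at other keys
    have hfc : (((c, v) :: t).filter (fun p => p.1 == c))
        = (c, v) :: t.takeWhile (fun q => q.1 == c) := by
      rw [List.filter_cons]
      simp only [beq_self_eq_true, if_true]
      congr 1
      conv_lhs => rw [← hsplit]
      rw [List.filter_append, List.filter_eq_self.mpr (fun a ha => by simp [f1 a ha]),
        List.filter_eq_nil_iff.mpr (fun a ha => by simp [ne_of_gt (f2 a ha)]), List.append_nil]
    have hfk : ∀ k, k ≠ c → (((c, v) :: t).filter (fun p => p.1 == k))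
        = (t.dropWhile (fun q => q.1 == c)).filter (fun p => p.1 == k) := by
      intro k hk
      rw [List.filter_cons]
      simp only [show (c == k) = false from beq_eq_false_iff_ne.mpr (Ne.symm hk),
        Bool.false_eq_true, if_false]
      conv_lhs => rw [← hsplit]
      rw [List.filter_append,
        List.filter_eq_nil_iff.mpr (fun a ha => by simp [f1 a ha, Ne.symm hk]), List.nil_append]
    -- unfold one step of pvCollapse
    have hunf : pvCollapse ((c, v) :: t)
        = (c, v + ((t.takeWhile (fun q => q.1 == c)).map (fun q => q.2)).sum)
          :: pvCollapse (t.dropWhile (fun q => q.1 == c)) := by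
      rw [pvCollapse, htr]
    rw [htr] at ih
    obtain ⟨ip, iv, im⟩ := ih hrestpw
    refine ⟨?_, ?_, ?_⟩
    · rw [hunf, List.pairwise_cons]
      refine ⟨?_, ip⟩
      intro p hp
      have : p.1 ∈ (pvCollapse (t.dropWhile (fun q => q.1 == c))).map (fun p => p.1) :=
        List.mem_map.mpr ⟨p, hp, rfl⟩
      obtain ⟨q, hq, hqe⟩ := List.mem_map.mp ((im p.1).mp this)
      exact hqe ▸ f2 q hq
    · intro p hp
      rw [hunf] at hp
      rcases List.mem_cons.mp hp with rfl | hp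
      · simp only [pvG, hfc, List.map_cons, List.sum_cons]
      · have hkne : p.1 ≠ c := by
          have : p.1 ∈ (pvCollapse (t.dropWhile (fun q => q.1 == c))).map (fun p => p.1) :=
            List.mem_map.mpr ⟨p, hp, rfl⟩
          obtain ⟨q, hq, hqe⟩ := List.mem_map.mp ((im p.1).mp this)
          exact hqe ▸ ne_of_gt (f2 q hq)
        rw [iv p hp]
        simp only [pvG, hfk p.1 hkne]
    · intro k
      rw [hunf]
      simp only [List.map_cons, List.mem_cons]
      constructor
      · rintro (rfl | hk)
        · left; rfl
        · right
          have := (im k).mp hk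
          exact (List.map_subset _ hrestsub.subset) this
      · rintro (rfl | hk)
        · left; rfl
        · obtain ⟨q, hq, hqe⟩ := List.mem_map.mp hk
          conv at hq => rw [← hsplit]
          rcases List.mem_append.mp hq with hq | hq
          · left; rw [← hqe, f1 q hq]
          · right; exact (im k).mpr (List.mem_map.mpr ⟨q, hq, hqe⟩)

lemma pvG_perm (S L : List (List String × Int)) (hp : S.Perm L) (k : List String) :
    pvG S k = pvG L k := by
  unfold pvG
  exact ((hp.filter _).map _).sum_eq

-- two strictly-key-sorted association lists with the same key set whose values are
-- determined by the same function of the key are equal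
lemma pvKeyedEq (g : List String → Int) (l₁ l₂ : List (List String × Int))
    (h₁ : l₁.Pairwise (fun a b => a.1 < b.1)) (h₂ : l₂.Pairwise (fun a b => a.1 < b.1))
    (hg₁ : ∀ p ∈ l₁, p.2 = g p.1) (hg₂ : ∀ p ∈ l₂, p.2 = g p.1)
    (hm : ∀ k, k ∈ l₁.map (fun p => p.1) ↔ k ∈ l₂.map (fun p => p.1)) : l₁ = l₂ := by
  have pw₁ : (l₁.map (fun p => p.1)).Pairwise (· < ·) := List.pairwise_map.mpr h₁
  have pw₂ : (l₂.map (fun p => p.1)).Pairwise (· < ·) := List.pairwise_map.mpr h₂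
  have nd₁ : (l₁.map (fun p => p.1)).Nodup := pw₁.imp ne_of_lt
  have nd₂ : (l₂.map (fun p => p.1)).Nodup := pw₂.imp ne_of_lt
  have hperm : (l₁.map (fun p => p.1)).Perm (l₂.map (fun p => p.1)) :=
    (List.perm_ext_iff_of_nodup nd₁ nd₂).mpr hm
  have hkeys : l₁.map (fun p => p.1) = l₂.map (fun p => p.1) :=
    PySem.List.eq_of_perm_of_pairwise_le_of_injective (fun k => k) (fun a b hab => hab) hperm
      (pw₁.imp le_of_lt) (pw₂.imp le_of_lt)
  have e₁ : l₁ = (l₁.map (fun p => p.1)).map (fun k => (k, g k)) := by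
    rw [List.map_map]
    conv_lhs => rw [← List.map_id l₁]
    exact List.map_congr_left (fun p hp => by
      have := hg₁ p hp
      simp [Function.comp, Prod.ext_iff, this])
  have e₂ : l₂ = (l₂.map (fun p => p.1)).map (fun k => (k, g k)) := by
    rw [List.map_map]
    conv_lhs => rw [← List.map_id l₂]
    exact List.map_congr_left (fun p hp => by
      have := hg₂ p hp
      simp [Function.comp, Prod.ext_iff, this])
  rw [e₁, e₂, hkeys]

-- the key's total in the contribution list, read off the accumulated dict
lemma getD_fold_mod (L : List (List String × Int)) (d : PySem.Dict (List String) Int)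
    (k : List String) :
    ((L.foldl (fun a q => a.modify q.1 0 (· + q.2)) d).getD k 0) = d.getD k 0 + pvG L k := by
  induction L generalizing d with
  | nil => simp [pvG]
  | cons q t ih =>
    simp only [List.foldl_cons, ih, PySem.Dict.getD_modify]
    by_cases hq : k = q.1
    · simp only [pvG, List.filter_cons, hq, beq_self_eq_true,
        List.map_cons, List.sum_cons, if_pos]
      ring
    · have hb : (q.1 == k) = false := beq_eq_false_iff_ne.mpr (fun e => hq e.symm)
      simp only [if_neg hq, pvG, List.filter_cons, hb, Bool.false_eq_true, if_false]

-- ===== VERDICT (by name: the statement is the Claim_ definition above) =====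
theorem reduce_sites_distribution_spec : Claim_equal_reduce_sites_distribution := by
  intro sd n _ hpre
  unfold Spec_reduce_sites_distribution
  rcases hpre with h | hn
  · subst h
    have h0 : pvCollapse ([] : List (List String × Int)) = [] := by simp [pvCollapse]
    simp only [reduce_sites_distribution, reduce_sites_distribution_alt, List.foldl_nil]
    rw [show PySem.List.sorted2 ([] : List (List String × Int)) (fun x => x.1) (fun x => x.2) false
          = [] from rfl, h0]
    rfl
  · rw [A_eq_flat sd n hn, B_eq_flat sd n hn]
    set L := pvContrib sd n with hL
    set d := L.foldl (fun a q => a.modify q.1 0 (· + q.2)) PySem.Dict.empty with hd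
    set S := PySem.List.sorted2 L (fun x => x.1) (fun x => x.2) false with hS
    have hSp : S.Perm L := PySem.List.sorted2_perm L _ _ false
    have hSsorted := sorted2_pairwise_fst_le L
    obtain ⟨cp1, cp2, cp3⟩ := pvCollapse_props S (hS ▸ hSsorted)
    -- A-side facts
    have hAperm : (PySem.List.sorted2 d.items (fun x => x.1) (fun x => x.2) false).Perm d.items :=
      PySem.List.sorted2_perm d.items _ _ false
    have hnd : d.keys.Nodup := by
      rw [hd]
      exact PySem.Dict.nodup_keys_foldl_modify_key L (fun p => p.1) 0 (fun _ p => (· + p.2)) _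
        PySem.Dict.nodup_keys_empty
    have hkeysd : d.keys = PySem.Set.ofList (L.map (fun p => p.1)) := by
      rw [hd]
      have := PySem.Dict.keys_foldl_modify_key L (fun p => p.1) 0 (fun _ p => (· + p.2))
        (PySem.Dict.empty : PySem.Dict (List String) Int)
      simpa [PySem.Set.update, PySem.Set.ofList] using this
    have hitemsfst : d.items.map (fun p => p.1) = d.keys := rfl
    apply pvKeyedEq (pvG L)
    · -- pairwise fst < on A's result
      have hle := sorted2_pairwise_fst_le d.items
      have hndA : ((PySem.List.sorted2 d.items (fun x => x.1) (fun x => x.2) false).map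
          (fun p => p.1)).Nodup := (hAperm.map _).nodup_iff.mpr (hitemsfst ▸ hnd)
      have hne : (PySem.List.sorted2 d.items (fun x => x.1) (fun x => x.2) false).Pairwise
          (fun a b => a.1 ≠ b.1) := List.pairwise_map.mp hndA
      exact (hle.and hne).imp (fun h => lt_of_le_of_ne h.1 h.2)
    · exact cp1
    · -- values on A's side
      intro p hp
      have hpi : p ∈ d.items := hAperm.mem_iff.mp hp
      have : d.getD p.1 0 = p.2 := PySem.Dict.getD_of_mem_items d hpi hnd 0
      rw [← this, hd, getD_fold_mod]
      simp
    · -- values on B's side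
      intro p hp
      rw [cp2 p hp, pvG_perm S L hSp]
    · -- key sets agree
      intro k
      rw [cp3 k]
      constructor
      · intro hk
        have : k ∈ d.items.map (fun p => p.1) := (hAperm.map _).mem_iff.mp hk
        rw [hitemsfst, hkeysd, PySem.Set.mem_ofList] at this
        exact (hSp.map _).mem_iff.mpr this
      · intro hk
        have hk' : k ∈ L.map (fun p => p.1) := (hSp.map _).mem_iff.mp hk
        have : k ∈ d.keys := by rw [hkeysd, PySem.Set.mem_ofList]; exact hk'
        exact (hAperm.map _).mem_iff.mpr (hitemsfst ▸ this)
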